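-- pv_equiv track=rewrite | github.com/pritikadasgupta/aoc2015 | notQuiteLisp.py | compute_floor
-- ===== SOURCE A (Python) =====
-- def compute_floor(inputs):
-- 	santa_pos = 0
-- 	for x in inputs:
-- 		if(x=="("):
-- 			santa_pos+=1
-- 		else:
-- 			santa_pos-=1
-- 	return(santa_pos)
-- ===== SOURCE B (Python) =====
-- def compute_floor(inputs):
--     opens = inputs.count("(")
--     return 2 * opens - len(inputs)
-- ===== Notes on version B (the rewrite author's own statement) =====
-- stated objective: simpler
-- what changed: Replaces the per-character accumulation loop with a closed-form arithmetic expression: 2*inputs.count('(') - len(inputs), derived from two aggregate counts.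
import Mathlib
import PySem

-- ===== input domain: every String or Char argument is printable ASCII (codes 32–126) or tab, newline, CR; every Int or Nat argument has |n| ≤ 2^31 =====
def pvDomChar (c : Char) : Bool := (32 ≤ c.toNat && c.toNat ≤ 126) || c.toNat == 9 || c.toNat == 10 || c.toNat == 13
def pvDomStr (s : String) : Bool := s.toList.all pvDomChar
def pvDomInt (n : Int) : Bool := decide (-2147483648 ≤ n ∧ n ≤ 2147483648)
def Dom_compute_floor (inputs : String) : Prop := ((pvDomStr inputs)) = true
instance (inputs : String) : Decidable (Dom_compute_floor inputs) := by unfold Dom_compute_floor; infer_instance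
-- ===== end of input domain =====

-- B replaces A's per-character accumulation loop with the closed form 2*count('(') - len; objective: simpler.

-- ===== PORT A =====
-- literal port of A: santa_pos starts at 0, +1 on '(' else -1, over the characters of inputs
def compute_floor (inputs : String) : Int :=
  inputs.toList.foldl (fun santa_pos x => if x == '(' then santa_pos + 1 else santa_pos - 1) 0

-- ===== PORT B =====
-- literal port of B: opens = inputs.count("("); return 2*opens - len(inputs)
def compute_floor_alt (inputs : String) : Int :=
  let opens : Int := (PySem.Str.count inputs "(" : Int)
  2 * opens - PySem.Str.len inputs

-- ===== PRECONDITION & SPEC =====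
def Spec_compute_floor (inputs : String) (out : Int) : Prop := out = compute_floor_alt inputs
instance (inputs : String) (out : Int) : Decidable (Spec_compute_floor inputs out) := by unfold Spec_compute_floor; infer_instance

-- ===== CLAIM (what is proved, stated in full; the proofs are below) =====
def Claim_equal_compute_floor : Prop := ∀ (inputs : String), Dom_compute_floor inputs → Spec_compute_floor inputs (compute_floor inputs)

-- ===== LEMMAS AND PROOFS =====

-- PySem.Chars.count with a single-character needle is List.count
theorem chars_count_go_single (c : Char) :
    ∀ (fuel : Nat) (l : List Char) (acc : Nat), l.length ≤ fuel →
      PySem.Chars.count.go [c] fuel l acc = acc + l.count c := by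
  intro fuel
  induction fuel with
  | zero =>
    intro l acc h
    have : l = [] := List.eq_nil_of_length_eq_zero (Nat.le_zero.mp h)
    subst this
    simp [PySem.Chars.count.go]
  | succ n ih =>
    intro l acc h
    cases l with
    | nil => simp [PySem.Chars.count.go]
    | cons hd t =>
      simp only [PySem.Chars.count.go]
      by_cases hc : hd = c
      · subst hc
        have hpre : List.isPrefixOf [hd] (hd :: t) = true := by
          simp [List.isPrefixOf]
        rw [if_pos hpre]
        simp only [List.length_singleton, List.drop_one, List.tail_cons]
        rw [ih t (acc + 1) (by simpa using Nat.lt_succ_iff.mp (by simpa using h))]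
        simp
        omega
      · have hpre : List.isPrefixOf [c] (hd :: t) = false := by
          simp [List.isPrefixOf]
          exact fun hh => (hc hh.symm).elim
        rw [hpre]
        simp only [Bool.false_eq_true, if_false]
        rw [ih t acc (by simpa using Nat.lt_succ_iff.mp (by simpa using h))]
        simp [hc]

theorem chars_count_single (c : Char) (l : List Char) :
    PySem.Chars.count l [c] = l.count c := by
  simp only [PySem.Chars.count, List.isEmpty_cons, Bool.false_eq_true, if_false]
  simpa using chars_count_go_single c l.length l 0 le_rfl

-- A's loop in closed form, with a generalized accumulator
theorem foldl_closed (l : List Char) :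
    ∀ (acc : Int),
      l.foldl (fun santa_pos x => if x == '(' then santa_pos + 1 else santa_pos - 1) acc
        = acc + 2 * (l.count '(' : Int) - l.length := by
  induction l with
  | nil => intro acc; simp
  | cons hd t ih =>
    intro acc
    simp only [List.foldl_cons, List.count_cons, List.length_cons]
    by_cases hc : hd = '('
    · subst hc
      rw [ih]
      simp
      ring
    · rw [if_neg (by simpa using hc), ih]
      simp [hc]
      ring

-- ===== VERDICT (by name: the statement is the Claim_ definition above) =====
theorem compute_floor_spec : Claim_equal_compute_floor := by
  intro inputs _
  unfold Spec_compute_floor compute_floor compute_floor_alt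
  rw [foldl_closed inputs.toList 0]
  have hc : PySem.Str.count inputs "(" = inputs.toList.count '(' := by
    rw [PySem.Str.count_eq]
    exact chars_count_single '(' inputs.toList
  have hl : PySem.Str.len inputs = (inputs.toList.length : Int) := by
    simp [PySem.Str.len_eq]
  rw [hc, hl]
  ring
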